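-- pv_equiv track=rewrite | github.com/Yunxi-Kong/STA561-Final-Infinite-Connections- | infinite_connections/seed_bank.py | _variant_groups
-- ===== SOURCE A (Python) =====
-- from itertools import combinations
--
-- MAX_VARIANTS_PER_POOL = 80
--
-- def _variant_groups(words: tuple[str, ...]) -> tuple[tuple[str, str, str, str], ...]:
--     normalized = tuple(dict.fromkeys(str(word).upper() for word in words))
--     all_groups = [_as_group(combo) for combo in combinations(normalized, 4)]
--     if len(all_groups) <= MAX_VARIANTS_PER_POOL:
--         return tuple(all_groups)
--
--     # Preserve broad coverage without letting a long pool dominate the bank.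
--     selected: list[tuple[str, str, str, str]] = []
--     seen: set[tuple[str, ...]] = set()
--     stride = max(1, len(all_groups) // MAX_VARIANTS_PER_POOL)
--     for index in range(0, len(all_groups), stride):
--         group = all_groups[index]
--         signature = tuple(sorted(group))
--         if signature in seen:
--             continue
--         seen.add(signature)
--         selected.append(group)
--         if len(selected) >= MAX_VARIANTS_PER_POOL:
--             break
--     return tuple(selected)
--
-- def _as_group(words: tuple[str, ...]) -> tuple[str, str, str, str]:
--     return (str(words[0]).upper(), str(words[1]).upper(), str(words[2]).upper(), str(words[3]).upper())
-- ===== SOURCE B (Python) =====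
-- MAX_VARIANTS_PER_POOL = 80
--
--
-- def _choose_small(m: int, j: int) -> int:
--     # C(m, j) for 0 <= j <= 3 (closed form; 0 when m < j).
--     if j == 0:
--         return 1
--     if j == 1:
--         return m
--     if j == 2:
--         return m * (m - 1) // 2
--     return m * (m - 1) * (m - 2) // 6
--
--
-- def _unrank(pool: tuple[str, ...], k: int, i: int) -> tuple[str, ...]:
--     # i-th (lex order) k-combination of pool, by the combinatorial number system.
--     if k == 0 or not pool:
--         return ()
--     c = _choose_small(len(pool) - 1, k - 1)
--     if i < c:
--         return (pool[0],) + _unrank(pool[1:], k - 1, i)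
--     return _unrank(pool[1:], k, i - c)
--
--
-- def _variant_groups(words: tuple[str, ...]) -> tuple[tuple[str, str, str, str], ...]:
--     normalized = tuple(dict.fromkeys(str(word).upper() for word in words))
--     n = len(normalized)
--     total = n * (n - 1) * (n - 2) * (n - 3) // 24  # C(n, 4)
--     if total <= MAX_VARIANTS_PER_POOL:
--         ranks = range(total)
--     else:
--         stride = max(1, total // MAX_VARIANTS_PER_POOL)
--         ranks = list(range(0, total, stride))[:MAX_VARIANTS_PER_POOL]
--     return tuple(_unrank(normalized, 4, i) for i in ranks)
-- ===== Notes on version B (the rewrite author's own statement) =====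
-- stated objective: faster
-- what changed: Instead of materialising all C(n,4) combinations and then stride-sampling with a no-op signature dedup, B computes total=C(n,4) in closed form and directly unranks only the <=80 strided combination indices via the combinatorial number system.
import Mathlib
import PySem

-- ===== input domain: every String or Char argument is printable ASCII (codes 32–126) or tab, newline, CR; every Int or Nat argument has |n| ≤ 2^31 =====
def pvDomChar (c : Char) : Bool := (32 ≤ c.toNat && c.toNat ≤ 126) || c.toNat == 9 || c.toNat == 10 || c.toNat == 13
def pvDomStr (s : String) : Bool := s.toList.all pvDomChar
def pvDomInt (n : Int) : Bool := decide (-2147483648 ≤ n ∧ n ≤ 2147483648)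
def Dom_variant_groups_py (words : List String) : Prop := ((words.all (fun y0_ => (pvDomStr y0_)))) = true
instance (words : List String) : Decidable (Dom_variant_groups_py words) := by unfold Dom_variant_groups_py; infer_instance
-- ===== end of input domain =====

-- B replaces A's "generate all C(n,4) combinations, then stride-sample with a (no-op) dedup"
-- by closed-form total = C(n,4) and direct unranking of only the selected ranks (objective: faster, measured).


-- ===== PORT A =====
-- itertools.combinations(l, 4): all k-combinations in lexicographic (index) order, here kept generic in k
def pvCombosA : List String → Nat → List (List String)
  | _, 0 => [[]]
  | [], _ + 1 => []
  | x :: xs, k + 1 => ((pvCombosA xs k).map (x :: ·)) ++ pvCombosA xs (k + 1)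

-- _as_group: tuple indexing words[0..3]; combos have length 4 so the "" default is unreachable
def pvAsGroup (g : List String) : String × String × String × String :=
  (PySem.Str.upper (g.getD 0 ""), PySem.Str.upper (g.getD 1 ""),
   PySem.Str.upper (g.getD 2 ""), PySem.Str.upper (g.getD 3 ""))

-- the strided selection loop with the `seen` signature set and the `break` at 80
def pvSelLoop (groups : List (String × String × String × String)) (idxs : List Int)
    (seen : PySem.Set (List String)) (selected : List (String × String × String × String)) :
    List (String × String × String × String) :=
  match idxs with
  | [] => selected
  | i :: rest =>
    -- index i is always in range (i ∈ range(0, len(groups), stride)), so the default is unreachable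
    let g := PySem.List.pyGetD groups i ("", "", "", "")
    let sig := PySem.List.sorted [g.1, g.2.1, g.2.2.1, g.2.2.2] (fun x => x) false
    if PySem.Set.contains seen sig then pvSelLoop groups rest seen selected
    else
      let selected' := selected ++ [g]
      if 80 ≤ selected'.length then selected'
      else pvSelLoop groups rest (PySem.Set.add seen sig) selected'

def variant_groups_py (words : List String) : List (String × String × String × String) :=
  let normalized := PySem.List.dedup (words.map PySem.Str.upper)
  let all_groups := (pvCombosA normalized 4).map pvAsGroup
  if all_groups.length ≤ 80 then all_groups
  else
    let stride : Nat := max 1 (all_groups.length / 80)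
    pvSelLoop all_groups (PySem.List.pyRange 0 (all_groups.length : Int) (stride : Int)) PySem.Set.empty []

-- ===== PORT B =====
-- C(m, j) for j ≤ 3, closed form (Source B _choose_small; arguments are nonnegative ints)
def pvChooseSmall (m j : Nat) : Nat :=
  if j = 0 then 1
  else if j = 1 then m
  else if j = 2 then m * (m - 1) / 2
  else m * (m - 1) * (m - 2) / 6

-- Source B _unrank: i-th lex k-combination of the pool, combinatorial number system
def pvUnrank : List String → Nat → Nat → List String
  | _, 0, _ => []
  | [], _ + 1, _ => []
  | x :: xs, k + 1, i =>
    let c := pvChooseSmall xs.length k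
    if i < c then x :: pvUnrank xs k i else pvUnrank xs (k + 1) (i - c)

-- tuple(...) of the 4 unranked words; the fallback is unreachable (ranks are < C(n,4))
def pvTuple4 (g : List String) : String × String × String × String :=
  match g with
  | [a, b, c, d] => (a, b, c, d)
  | _ => ("", "", "", "")

def variant_groups_py_alt (words : List String) : List (String × String × String × String) :=
  let normalized := PySem.List.dedup (words.map PySem.Str.upper)
  let n := normalized.length
  let total := n * (n - 1) * (n - 2) * (n - 3) / 24
  let ranks : List Int :=
    if total ≤ 80 then PySem.List.pyRange 0 (total : Int) 1
    else
      let stride : Nat := max 1 (total / 80)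
      (PySem.List.pyRange 0 (total : Int) (stride : Int)).take 80
  -- ranks are nonnegative, so .toNat is exact
  ranks.map (fun i => pvTuple4 (pvUnrank normalized 4 i.toNat))

-- ===== PRECONDITION & SPEC =====
def Spec_variant_groups_py (words : List String) (out : List (String × String × String × String)) : Prop := out = variant_groups_py_alt words
instance (words : List String) (out : List (String × String × String × String)) : Decidable (Spec_variant_groups_py words out) := by unfold Spec_variant_groups_py; infer_instance

-- ===== CLAIM (what is proved, stated in full; the proofs are below) =====
def Claim_equal_variant_groups_py : Prop := ∀ (words : List String), Dom_variant_groups_py words → Spec_variant_groups_py words (variant_groups_py words)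

-- ===== LEMMAS AND PROOFS =====

theorem pvUpperChar_idem (c : Char) :
    PySem.Chars.upperChar (PySem.Chars.upperChar c) = PySem.Chars.upperChar c := by
  unfold PySem.Chars.upperChar PySem.Chars.islower
  have hle : ∀ a b : Char, (a ≤ b) ↔ a.toNat ≤ b.toNat := by
    intro a b; rw [Char.le_def, UInt32.le_iff_toNat_le]; rfl
  split_ifs with h1 h2 <;> try rfl
  exfalso
  simp only [Bool.and_eq_true, decide_eq_true_eq, hle] at h1 h2
  have hv : ('a' : Char).toNat = 97 := rfl
  have hz : ('z' : Char).toNat = 122 := rfl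
  rw [hv, hz] at h1 h2
  have hval : (c.toNat - 32).isValidChar := by constructor; omega
  rw [Char.toNat_ofNat, if_pos hval] at h2
  omega

theorem pvUpper_idem (s : String) :
    PySem.Str.upper (PySem.Str.upper s) = PySem.Str.upper s := by
  apply String.toList_inj.mp
  rw [PySem.Str.toList_upper, PySem.Str.toList_upper]
  unfold PySem.Chars.upper
  rw [List.map_map]
  exact List.map_congr_left (fun c _ => pvUpperChar_idem c)


theorem pvChooseSmall_eq (m j : Nat) (hj : j ≤ 3) : pvChooseSmall m j = Nat.choose m j := by
  interval_cases j
  · simp [pvChooseSmall]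
  · simp [pvChooseSmall]
  · simp [pvChooseSmall, Nat.choose_two_right]
  · simp only [pvChooseSmall]
    norm_num
    rw [Nat.choose_eq_descFactorial_div_factorial]
    congr 1
    · simp [Nat.descFactorial]; ring

theorem pvTotal_eq (n : Nat) : n * (n - 1) * (n - 2) * (n - 3) / 24 = Nat.choose n 4 := by
  rw [Nat.choose_eq_descFactorial_div_factorial]
  congr 1
  · simp [Nat.descFactorial]; ring

theorem pvLenCombosA (l : List String) (k : Nat) : (pvCombosA l k).length = Nat.choose l.length k := by
  induction l generalizing k with
  | nil => cases k <;> simp [pvCombosA]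
  | cons x xs ih =>
    cases k with
    | zero => simp [pvCombosA]
    | succ k => simp [pvCombosA, ih, Nat.choose_succ_succ']

theorem pvGetCombosA (l : List String) (k i : Nat) (hk : k ≤ 4) (hi : i < Nat.choose l.length k) :
    (pvCombosA l k)[i]? = some (pvUnrank l k i) := by
  induction l generalizing k i with
  | nil =>
    cases k with
    | zero => simp at hi; simp [hi, pvCombosA, pvUnrank]
    | succ k => simp at hi
  | cons x xs ih =>
    cases k with
    | zero => simp at hi; simp [hi, pvCombosA, pvUnrank]
    | succ k =>
      have hc : pvChooseSmall xs.length k = Nat.choose xs.length k :=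
        pvChooseSmall_eq _ _ (by omega)
      have hlen : ((pvCombosA xs k).map (x :: ·)).length = Nat.choose xs.length k := by
        simp [pvLenCombosA]
      simp only [pvCombosA, pvUnrank, hc]
      by_cases h : i < Nat.choose xs.length k
      · rw [List.getElem?_append, if_pos (by omega), if_pos h, List.getElem?_map,
          ih k i (by omega) h]
        rfl
      · rw [List.getElem?_append, if_neg (by omega), if_neg h, hlen]
        have hi' : i - Nat.choose xs.length k < Nat.choose xs.length (k + 1) := by
          simp only [List.length_cons, Nat.choose_succ_succ'] at hi
          omega
        exact ih (k + 1) _ hk hi'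

theorem pvCombosA_mem_length {l : List String} {k : Nat} {g : List String}
    (h : g ∈ pvCombosA l k) : g.length = k := by
  induction l generalizing k g with
  | nil => cases k <;> simp_all [pvCombosA]
  | cons x xs ih =>
    cases k with
    | zero => simp [pvCombosA] at h; simp [h]
    | succ k =>
      simp only [pvCombosA, List.mem_append, List.mem_map] at h
      rcases h with ⟨g', hg', rfl⟩ | h
      · simp [ih hg']
      · exact ih h

theorem pvCombosA_mem_subset {l : List String} {k : Nat} {g : List String}
    (h : g ∈ pvCombosA l k) : ∀ x ∈ g, x ∈ l := by
  induction l generalizing k g with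
  | nil => cases k <;> simp_all [pvCombosA]
  | cons x xs ih =>
    cases k with
    | zero => simp [pvCombosA] at h; simp [h]
    | succ k =>
      simp only [pvCombosA, List.mem_append, List.mem_map] at h
      rcases h with ⟨g', hg', rfl⟩ | h
      · intro y hy
        rcases List.mem_cons.mp hy with rfl | hy
        · exact List.mem_cons_self
        · exact List.mem_cons_of_mem _ (ih hg' y hy)
      · exact fun y hy => List.mem_cons_of_mem _ (ih h y hy)

theorem pvCombosA_pairwise {l : List String} (hl : l.Nodup) (k : Nat) :
    (pvCombosA l k).Pairwise (fun g h => ¬ g.Perm h) := by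
  induction l generalizing k with
  | nil => cases k <;> simp [pvCombosA]
  | cons x xs ih =>
    have hx : x ∉ xs := (List.nodup_cons.mp hl).1
    have hxs : xs.Nodup := (List.nodup_cons.mp hl).2
    cases k with
    | zero => simp [pvCombosA]
    | succ k =>
      simp only [pvCombosA]
      rw [List.pairwise_append]
      refine ⟨?_, ih hxs (k+1), ?_⟩
      · rw [List.pairwise_map]
        exact (ih hxs k).imp (fun h hp => h ((List.perm_cons x).mp hp))
      · rintro a ha b hb hp
        simp only [List.mem_map] at ha
        rcases ha with ⟨g', _, rfl⟩
        have hxb : x ∈ b := hp.mem_iff.mp List.mem_cons_self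
        exact hx (pvCombosA_mem_subset hb x hxb)

theorem pvAsGroup_eq_tuple4 (g : List String) (hlen : g.length = 4)
    (hfix : ∀ x ∈ g, PySem.Str.upper x = x) : pvAsGroup g = pvTuple4 g := by
  rcases g with _ | ⟨a, _ | ⟨b, _ | ⟨c, _ | ⟨d, _ | _⟩⟩⟩⟩ <;> simp at hlen
  simp only [List.mem_cons, forall_eq_or_imp] at hfix
  simp [pvAsGroup, pvTuple4, hfix.1, hfix.2.1, hfix.2.2.1, hfix.2.2.2.1]

-- sorted(group) as used by A's loop
def pvSig (g : String × String × String × String) : List String :=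
  PySem.List.sorted [g.1, g.2.1, g.2.2.1, g.2.2.2] (fun x => x) false

theorem pvSelLoop_eq (groups : List (String × String × String × String)) :
    ∀ (idxs : List Int) (seen : PySem.Set (List String))
      (sel : List (String × String × String × String)),
    sel.length < 80 →
    idxs.Pairwise (fun i j => pvSig (PySem.List.pyGetD groups i ("", "", "", "")) ≠
      pvSig (PySem.List.pyGetD groups j ("", "", "", ""))) →
    (∀ i ∈ idxs, PySem.Set.contains seen (pvSig (PySem.List.pyGetD groups i ("", "", "", ""))) = false) →
    pvSelLoop groups idxs seen sel =
      sel ++ (idxs.map (fun i => PySem.List.pyGetD groups i ("", "", "", ""))).take (80 - sel.length)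
  | [], seen, sel, hsel, _, _ => by simp [pvSelLoop]
  | i :: rest, seen, sel, hsel, hpw, hseen => by
    have hg := hseen i List.mem_cons_self
    simp only [pvSelLoop]
    rw [show (PySem.List.sorted [(PySem.List.pyGetD groups i ("", "", "", "")).1,
      (PySem.List.pyGetD groups i ("", "", "", "")).2.1,
      (PySem.List.pyGetD groups i ("", "", "", "")).2.2.1,
      (PySem.List.pyGetD groups i ("", "", "", "")).2.2.2] (fun x => x) false) =
      pvSig (PySem.List.pyGetD groups i ("", "", "", "")) from rfl]
    rw [hg]
    simp only [Bool.false_eq_true, if_false, List.length_append, List.length_singleton]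
    by_cases hstop : 80 ≤ sel.length + 1
    · rw [if_pos hstop]
      have h79 : sel.length = 79 := by omega
      simp [h79, List.take_succ_cons]
    · rw [if_neg hstop]
      have hpw' := (List.pairwise_cons.mp hpw)
      rw [pvSelLoop_eq groups rest _ _ (by simp; omega) hpw'.2 ?_]
      · have h1 : 80 - sel.length = (80 - (sel.length + 1)) + 1 := by omega
        simp [h1, List.take_succ_cons]
      · intro j hj
        rw [Bool.eq_false_iff]
        intro hc
        rcases (PySem.Set.mem_add _ _ _).mp ((PySem.Set.contains_iff _ _).mp hc) with hmem | heq
        · exact absurd ((PySem.Set.contains_iff _ _).mpr hmem)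
            (by rw [hseen j (List.mem_cons_of_mem _ hj)]; simp)
        · exact hpw'.1 j hj heq.symm

-- ===== VERDICT (by name: the statement is the Claim_ definition above) =====
theorem variant_groups_py_spec : Claim_equal_variant_groups_py := by
  intro words _
  unfold Spec_variant_groups_py variant_groups_py variant_groups_py_alt
  simp only []
  set l := PySem.List.dedup (words.map PySem.Str.upper) with hldef
  have hnd : l.Nodup := PySem.List.nodup_dedup _
  have hfix : ∀ x ∈ l, PySem.Str.upper x = x := by
    intro x hx
    rcases List.mem_map.mp ((PySem.List.mem_dedup _ _).mp hx) with ⟨w, _, rfl⟩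
    exact pvUpper_idem w
  set t := Nat.choose l.length 4 with htdef
  have htot : l.length * (l.length - 1) * (l.length - 2) * (l.length - 3) / 24 = t := pvTotal_eq _
  have hlenAll : ((pvCombosA l 4).map pvAsGroup).length = t := by
    simp [pvLenCombosA, htdef]
  have hfg : ∀ i, i < t → ((pvCombosA l 4).map pvAsGroup)[i]? = some (pvTuple4 (pvUnrank l 4 i)) := by
    intro i hi
    have hm := pvGetCombosA l 4 i (by norm_num) hi
    have hmem : pvUnrank l 4 i ∈ pvCombosA l 4 := List.mem_of_getElem? hm
    rw [List.getElem?_map, hm, Option.map_some,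
      pvAsGroup_eq_tuple4 _ (pvCombosA_mem_length hmem)
        (fun x hx => hfix x (pvCombosA_mem_subset hmem x hx))]
  rw [htot, hlenAll]
  have hgetD : ∀ x : Int, 0 ≤ x → x < (t : Int) →
      PySem.List.pyGetD (List.map pvAsGroup (pvCombosA l 4)) x ("", "", "", "") =
        pvTuple4 (pvUnrank l 4 x.toNat) := by
    intro x h0 h1
    rw [PySem.List.pyGetD_eq_getElem _ _ h0 (by rw [hlenAll]; omega)]
    have h := hfg x.toNat (by omega)
    rw [List.getElem?_eq_getElem (by rw [hlenAll]; omega)] at h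
    exact Option.some.inj h
  have hdiff : ∀ i j : Nat, i < t → j < t → i ≠ j →
      pvSig (pvTuple4 (pvUnrank l 4 i)) ≠ pvSig (pvTuple4 (pvUnrank l 4 j)) := by
    have hsig : ∀ m, m < t → pvSig (pvTuple4 (pvUnrank l 4 m)) =
        PySem.List.sorted (pvUnrank l 4 m) (fun x => x) false := by
      intro m hm
      have hmem : pvUnrank l 4 m ∈ pvCombosA l 4 :=
        List.mem_of_getElem? (pvGetCombosA l 4 m (by norm_num) hm)
      have h4 := pvCombosA_mem_length hmem
      rcases hh : pvUnrank l 4 m with _ | ⟨a, _ | ⟨b, _ | ⟨c, _ | ⟨d, _ | _⟩⟩⟩⟩ <;>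
        rw [hh] at h4 <;> simp at h4
      rfl
    have hlenC := pvLenCombosA l 4
    have hgi : ∀ m, ∀ hm : m < t, (pvCombosA l 4)[m]'(by omega) = pvUnrank l 4 m := by
      intro m hm
      have h := pvGetCombosA l 4 m (by norm_num) hm
      rw [List.getElem?_eq_getElem (by omega)] at h
      exact Option.some.inj h
    intro i j hi hj hne heq
    rw [hsig i hi, hsig j hj, PySem.List.sorted_id_eq_sorted_id_iff_perm] at heq
    have hp := pvCombosA_pairwise hnd 4
    rw [List.pairwise_iff_getElem] at hp
    rcases Nat.lt_or_ge i j with h | h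
    · have hnp := hp i j (by omega) (by omega) h
      rw [hgi i hi, hgi j hj] at hnp
      exact hnp heq
    · have hnp := hp j i (by omega) (by omega) (by omega)
      rw [hgi i hi, hgi j hj] at hnp
      exact hnp heq.symm
  by_cases hc : t ≤ 80
  · rw [if_pos hc, if_pos hc, PySem.List.pyRange_one, List.map_map]
    apply List.ext_getElem?
    intro i
    by_cases hi : i < t
    · rw [hfg i hi, List.getElem?_map, List.getElem?_range (by simpa using hi)]
      simp
    · rw [List.getElem?_eq_none (by rw [hlenAll]; omega),
        List.getElem?_eq_none (by simp; omega)]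
  · rw [if_neg hc, if_neg hc]
    have hs : (0 : Int) < ((max 1 (t / 80) : Nat) : Int) := by
      have : 1 ≤ max 1 (t / 80) := le_max_left _ _
      omega
    have hbound : ∀ x : Int, x ∈ PySem.List.pyRange 0 (t : Int) ((max 1 (t / 80) : Nat) : Int) →
        0 ≤ x ∧ x < (t : Int) := by
      intro x hx
      have h := (PySem.List.mem_pyRange_iff_of_pos hs x).mp hx
      exact ⟨h.1, h.2.1⟩
    have hpw : (PySem.List.pyRange 0 (t : Int) ((max 1 (t / 80) : Nat) : Int)).Pairwise
        (fun i j => pvSig (PySem.List.pyGetD (List.map pvAsGroup (pvCombosA l 4)) i ("", "", "", "")) ≠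
          pvSig (PySem.List.pyGetD (List.map pvAsGroup (pvCombosA l 4)) j ("", "", "", ""))) := by
      have hmono := PySem.List.pyRange_of_pos 0 (t : Int) hs
      rw [hmono, List.pairwise_map]
      apply List.Pairwise.imp_of_mem ?_ List.pairwise_lt_range
      intro a b ha hb hab
      have hma : ((0 : Int) + ((max 1 (t / 80) : Nat) : Int) * (a : Int)) ∈
          PySem.List.pyRange 0 (t : Int) ((max 1 (t / 80) : Nat) : Int) := by
        rw [hmono]; exact List.mem_map.mpr ⟨a, ha, rfl⟩
      have hmb : ((0 : Int) + ((max 1 (t / 80) : Nat) : Int) * (b : Int)) ∈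
          PySem.List.pyRange 0 (t : Int) ((max 1 (t / 80) : Nat) : Int) := by
        rw [hmono]; exact List.mem_map.mpr ⟨b, hb, rfl⟩
      obtain ⟨h0a, h1a⟩ := hbound _ hma
      obtain ⟨h0b, h1b⟩ := hbound _ hmb
      rw [hgetD _ h0a h1a, hgetD _ h0b h1b]
      have hlt : ((max 1 (t / 80) : Nat) : Int) * (a : Int) <
          ((max 1 (t / 80) : Nat) : Int) * (b : Int) :=
        mul_lt_mul_of_pos_left (by exact_mod_cast hab) hs
      exact hdiff _ _ (by omega) (by omega) (by omega)
    rw [pvSelLoop_eq _ _ _ _ (by norm_num) hpw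
      (fun i _ => by simp [PySem.Set.empty, PySem.Set.contains])]
    simp only [List.nil_append]
    rw [List.map_take]
    congr 1
    apply List.map_congr_left
    intro x hx
    obtain ⟨h0, h1⟩ := hbound x hx
    exact hgetD x h0 h1
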